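-- pv_equiv track=rewrite | github.com/danbinaerinHan/MusicEduApp | treat_song.py | classify_pitch_level
-- ===== SOURCE A (Python) =====
-- def classify_pitch_level(pitches):
--     has_high = any(p >= 60 for p in pitches)
--     has_mid = any(53 <= p <= 57 for p in pitches)
--     has_low = any(p <= 52 for p in pitches)
--
--     if has_high:
--         return "고음역대"
--     elif has_mid:
--         return "중간 음역대"
--     else:
--         return "저음역대"
-- ===== SOURCE B (Python) =====
-- def classify_pitch_level(pitches):
--     has_mid = False
--     for p in pitches:
--         if p >= 60:
--             return "고음역대"
--         if 53 <= p <= 57: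
--             has_mid = True
--     return "중간 음역대" if has_mid else "저음역대"
-- ===== Notes on version B (the rewrite author's own statement) =====
-- stated objective: simpler
-- what changed: Replaces A's three full any() scans plus a branch chain with one early-exiting pass that returns on the first high pitch and keeps a single has_mid flag.
import Mathlib
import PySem

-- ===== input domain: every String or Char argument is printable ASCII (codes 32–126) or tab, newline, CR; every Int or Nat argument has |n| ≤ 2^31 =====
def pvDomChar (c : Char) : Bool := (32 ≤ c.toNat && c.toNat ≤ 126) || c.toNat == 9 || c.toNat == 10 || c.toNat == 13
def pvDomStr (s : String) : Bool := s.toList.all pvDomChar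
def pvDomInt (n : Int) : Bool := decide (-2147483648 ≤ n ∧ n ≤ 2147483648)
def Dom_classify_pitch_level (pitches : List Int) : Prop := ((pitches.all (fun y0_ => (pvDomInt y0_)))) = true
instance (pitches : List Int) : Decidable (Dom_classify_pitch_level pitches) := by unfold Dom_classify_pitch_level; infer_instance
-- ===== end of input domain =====

-- B replaces A's three full any() scans with a single early-exiting pass holding one has_mid flag (objective: simpler).

-- ===== PORT A =====
def classify_pitch_level (pitches : List Int) : String :=
  let has_high := pitches.any (fun p => p ≥ 60)
  let has_mid := pitches.any (fun p => 53 ≤ p && p ≤ 57)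
  let _has_low := pitches.any (fun p => p ≤ 52)
  if has_high then "고음역대"
  else if has_mid then "중간 음역대"
  else "저음역대"

-- ===== PORT B =====
def classify_pitch_level_alt_loop (pitches : List Int) (has_mid : Bool) : String :=
  match pitches with
  | [] => if has_mid then "중간 음역대" else "저음역대"
  | p :: rest =>
    if p ≥ 60 then "고음역대"
    else classify_pitch_level_alt_loop rest (if 53 ≤ p && p ≤ 57 then true else has_mid)

def classify_pitch_level_alt (pitches : List Int) : String :=
  classify_pitch_level_alt_loop pitches false

-- ===== PRECONDITION & SPEC =====
def Spec_classify_pitch_level (pitches : List Int) (out : String) : Prop := out = classify_pitch_level_alt pitches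
instance (pitches : List Int) (out : String) : Decidable (Spec_classify_pitch_level pitches out) := by unfold Spec_classify_pitch_level; infer_instance

-- ===== CLAIM (what is proved, stated in full; the proofs are below) =====
def Claim_equal_classify_pitch_level : Prop := ∀ (pitches : List Int), Dom_classify_pitch_level pitches → Spec_classify_pitch_level pitches (classify_pitch_level pitches)

-- ===== LEMMAS AND PROOFS =====
lemma alt_loop_char (pitches : List Int) (b : Bool) :
    classify_pitch_level_alt_loop pitches b =
      if pitches.any (fun p => p ≥ 60) then "고음역대"
      else if b || pitches.any (fun p => 53 ≤ p && p ≤ 57) then "중간 음역대"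
      else "저음역대" := by
  induction pitches generalizing b with
  | nil => simp [classify_pitch_level_alt_loop]
  | cons p rest ih =>
    simp only [classify_pitch_level_alt_loop, List.any_cons]
    by_cases h : p ≥ 60
    · simp [h]
    · have : ¬ (decide (p ≥ 60) = true) := by simp [h]
      rw [if_neg h, ih]
      by_cases hr : rest.any (fun p => p ≥ 60) = true
      · simp [hr, this]
      · simp only [Bool.or_eq_true] at *
        by_cases hm : (53 ≤ p && p ≤ 57) = true <;>
          simp [hm, this, hr]

-- ===== VERDICT (by name: the statement is the Claim_ definition above) =====
theorem classify_pitch_level_spec : Claim_equal_classify_pitch_level := by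
  intro pitches _
  unfold Spec_classify_pitch_level classify_pitch_level classify_pitch_level_alt
  rw [alt_loop_char]
  simp
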